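-- pv_equiv track=rewrite | github.com/rrflymartingale/Introduction-to-Computer-Science | Final_Project.py | path_to_friend
-- ===== SOURCE A (Python) =====
-- def get_connections(network, user):
--     if user in network:
--         return network[user]['Connections']
--     else:
--         return None
--
-- def path_to_friend(network, start, end, path=None):
--     if (get_connections(network, start) is None) or (get_connections(network, end) is None) or (start == end):
--         return None
--     if path is None:
--         path = []
--     path = path + [start]
--     if end in get_connections(network, start):
--         return path + [end]
--     for node in get_connections(network, start):
--         if node not in path:
--             newpath = path_to_friend(network, node, end, path)
--             if newpath:
--                 return newpath
--     return None
-- ===== SOURCE B (Python) =====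
-- def path_to_friend(network, start, end, path=None):
--     def conns_of(u):
--         return network[u]['Connections'] if u in network else None
--     if conns_of(start) is None or conns_of(end) is None or start == end:
--         return None
--     stack = [(start, ([] if path is None else path) + [start])]
--     while stack:
--         node, p = stack.pop()
--         cs = conns_of(node)
--         if cs is None:
--             continue
--         if end in cs:
--             return p + [end]
--         for nbr in reversed(cs):
--             if nbr not in p:
--                 stack.append((nbr, p + [nbr]))
--     return None
-- ===== Notes on version B (the rewrite author's own statement) =====
-- stated objective: alternative
-- what changed: A's recursive backtracking (recursion plus a for-loop with first-success return) is replaced by an iterative DFS over an explicit stack of (node, path) pairs, pushing unvisited neighbours in reversed order so the pop order reproduces A's preorder first-success path exactly.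
import Mathlib
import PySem

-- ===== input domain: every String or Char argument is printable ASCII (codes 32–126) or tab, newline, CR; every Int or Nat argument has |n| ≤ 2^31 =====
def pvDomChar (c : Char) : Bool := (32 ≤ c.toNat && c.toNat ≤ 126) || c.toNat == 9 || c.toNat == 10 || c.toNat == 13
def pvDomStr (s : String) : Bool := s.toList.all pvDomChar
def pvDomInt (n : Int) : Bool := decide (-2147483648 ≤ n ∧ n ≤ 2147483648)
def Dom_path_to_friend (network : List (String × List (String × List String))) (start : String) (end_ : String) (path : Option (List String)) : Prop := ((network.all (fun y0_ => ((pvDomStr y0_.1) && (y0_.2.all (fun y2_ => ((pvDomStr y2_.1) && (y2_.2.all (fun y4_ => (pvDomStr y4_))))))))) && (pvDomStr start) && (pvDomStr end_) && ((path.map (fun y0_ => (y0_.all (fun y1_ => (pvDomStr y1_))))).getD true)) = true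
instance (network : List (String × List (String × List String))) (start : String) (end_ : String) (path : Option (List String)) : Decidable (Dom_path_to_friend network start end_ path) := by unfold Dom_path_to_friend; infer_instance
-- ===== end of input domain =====

-- B replaces A's recursive backtracking by an iterative DFS over an explicit stack (same return value; alternative decomposition).

-- ===== PORT A =====
-- first-match association-list lookup (= Python dict lookup under the task's type convention)
def pvLookA {β : Type} (l : List (String × β)) (k : String) : Option β :=
  (l.find? (fun e => e.1 == k)).map (·.2)

-- network[user]['Connections'] ; the inner lookup raises KeyError in Python when a
-- member dict lacks the 'Connections' key — those inputs are excluded by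
-- Pre_path_to_friend; on them this port returns none instead of raising.
def pv_gc (network : List (String × List (String × List String))) (user : String) : Option (List String) :=
  match pvLookA network user with
  | some d => pvLookA d "Connections"
  | none => none

-- literal transliteration of A: the guard chain, the end-in-connections check, and the
-- for-loop over connections as a structural recursion (pvLoopA); fuel only makes the
-- recursion structurally total (one unit per nested call) and provably never runs out
-- at the depth bound network.length + 1 used below
mutual
def pvGoA (fuel : Nat) (network : List (String × List (String × List String))) (end_ : String)
    (start : String) (path : List String) : Option (List String) :=
  match fuel with
  | 0 => none
  | Nat.succ f =>
    if pv_gc network start = none ∨ pv_gc network end_ = none ∨ start = end_ then none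
    else
      let conns := (pv_gc network start).getD []
      let p := path ++ [start]
      if end_ ∈ conns then some (p ++ [end_])
      else pvLoopA f network end_ conns p
termination_by (fuel, 0)

def pvLoopA (fuel : Nat) (network : List (String × List (String × List String))) (end_ : String)
    (nodes : List String) (p : List String) : Option (List String) :=
  match nodes with
  | [] => none
  | node :: rest =>
    if node ∈ p then pvLoopA fuel network end_ rest p
    else
      match pvGoA fuel network end_ node p with
      | none => pvLoopA fuel network end_ rest p
      | some np => if np = [] then pvLoopA fuel network end_ rest p else some np
termination_by (fuel, nodes.length + 1)
end

def path_to_friend (network : List (String × List (String × List String))) (start : String) (end_ : String) (path : Option (List String)) : Option (List String) :=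
  pvGoA (network.length + 1) network end_ start (path.getD [])

-- ===== PORT B =====
-- first-match association-list lookup, written as a right fold
def pvLookB {β : Type} (l : List (String × β)) (k : String) : Option β :=
  l.foldr (fun e acc => if e.1 == k then some e.2 else acc) none

def pvGcB (network : List (String × List (String × List String))) (user : String) : Option (List String) :=
  (pvLookB network user).bind (fun d => pvLookB d "Connections")

-- total number of listed connections in the network (used only for the loop's fuel bound)
def pvTotB (network : List (String × List (String × List String))) : Nat :=
  network.foldr (fun e acc => e.2.foldr (fun kv a => kv.2.length + a) 0 + acc) 0

-- the while-loop of Source B; Python pushes the not-yet-visited neighbours in reversed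
-- order onto the end of its list and pops from the end, which with the head of this
-- list as top-of-stack is the doubly-reversed prepend below; the fuel only bounds the
-- iteration count and provably never runs out at the value supplied below
def pvLoopB (fuel : Nat) (network : List (String × List (String × List String))) (end_ : String)
    (stack : List (String × List String)) : Option (List String) :=
  match fuel with
  | 0 => none
  | Nat.succ f =>
    match stack with
    | [] => none
    | (node, p) :: rest =>
      match pvGcB network node with
      | none => pvLoopB f network end_ rest
      | some conns =>
        if end_ ∈ conns then some (p ++ [end_])
        else pvLoopB f network end_ (((conns.reverse.filter (fun n => ¬ n ∈ p)).map (fun n => (n, p ++ [n]))).reverse ++ rest)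

def path_to_friend_alt (network : List (String × List (String × List String))) (start : String) (end_ : String) (path : Option (List String)) : Option (List String) :=
  if pvGcB network start = none ∨ pvGcB network end_ = none ∨ start = end_ then
    none
  else
    pvLoopB ((pvTotB network + 2) ^ (2 * network.length + 1)) network end_ [(start, path.getD [] ++ [start])]

-- ===== PRECONDITION & SPEC =====
def pv_inNet (network : List (String × List (String × List String))) (u : String) : Bool :=
  (pvLookA network u).isSome

def pv_hasConn (network : List (String × List (String × List String))) (u : String) : Bool :=
  match pvLookA network u with
  | some d => (pvLookA d "Connections").isSome
  | none => false

-- Pre_ excludes the inputs on which Python's get_connections reaches a network member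
-- whose dict lacks the 'Connections' key and raises KeyError; it keeps every
-- early-return case (start not a member; start a well-formed member and end not a
-- member or equal to start) and every fully well-formed network.  It can exclude some
-- inputs where A still returns None (a defective member the search never touches) —
-- see the cites in the claim.
def Pre_path_to_friend (network : List (String × List (String × List String))) (start : String) (end_ : String) (path : Option (List String)) : Prop :=
  pv_inNet network start = false ∨
    (pv_hasConn network start = true ∧
      (pv_inNet network end_ = false ∨
        (pv_hasConn network end_ = true ∧
          (start = end_ ∨ ∀ e ∈ network, (pvLookA e.2 "Connections").isSome = true))))

instance (network : List (String × List (String × List String))) (start : String) (end_ : String) (path : Option (List String)) : Decidable (Pre_path_to_friend network start end_ path) := by unfold Pre_path_to_friend; infer_instance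

def pvWitness_path_to_friend : (List (String × List (String × List String))) × String × String × Option (List String) :=
  ([("a", [("Connections", ["b"])]), ("b", [("Connections", [])])], "a", "b", none)

def Spec_path_to_friend (network : List (String × List (String × List String))) (start : String) (end_ : String) (path : Option (List String)) (out : Option (List String)) : Prop := out = path_to_friend_alt network start end_ path
instance (network : List (String × List (String × List String))) (start : String) (end_ : String) (path : Option (List String)) (out : Option (List String)) : Decidable (Spec_path_to_friend network start end_ path out) := by unfold Spec_path_to_friend; infer_instance

-- ===== CLAIM (what is proved, stated in full; the proofs are below) =====
def Claim_equal_path_to_friend : Prop := ∀ (network : List (String × List (String × List String))) (start : String) (end_ : String) (path : Option (List String)), Dom_path_to_friend network start end_ path → Pre_path_to_friend network start end_ path → Spec_path_to_friend network start end_ path (path_to_friend network start end_ path)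

-- ===== LEMMAS AND PROOFS =====

-- the two lookups agree
theorem pv_look_eq {β : Type} (l : List (String × β)) (k : String) :
    pvLookB l k = pvLookA l k := by
  induction l with
  | nil => rfl
  | cons e t ih =>
    simp only [pvLookB, pvLookA, List.foldr, List.find?] at ih ⊢
    cases h : (e.1 == k)
    · simp only [Bool.false_eq_true, if_false]
      exact ih
    · simp

theorem pv_gc_eq (network : List (String × List (String × List String))) (u : String) :
    pvGcB network u = pv_gc network u := by
  unfold pvGcB pv_gc
  rw [pv_look_eq]
  cases pvLookA network u with
  | none => rfl
  | some d => simp [pv_look_eq]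

-- number of network keys not yet on the path: A's recursion depth measure
def pv_mu (network : List (String × List (String × List String))) (p : List String) : Nat :=
  ((network.map Prod.fst).filter (fun u => ¬ u ∈ p)).length

theorem pv_filt_le (l : List String) (p q : String → Bool) (h : ∀ x, p x = true → q x = true) :
    (l.filter p).length ≤ (l.filter q).length := by
  induction l with
  | nil => simp
  | cons a t ih =>
    rw [List.filter_cons, List.filter_cons]
    by_cases hp : p a = true
    · rw [if_pos hp, if_pos (h a hp)]; simpa using ih
    · rw [if_neg hp]
      by_cases hq : q a = true
      · rw [if_pos hq]; simp; omega
      · rw [if_neg hq]; exact ih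

theorem pv_filt_lt {l : List String} {x : String} {p : List String}
    (hx : x ∈ l) (hp : ¬ x ∈ p) :
    (l.filter (fun u => ¬ u ∈ p ++ [x])).length < (l.filter (fun u => ¬ u ∈ p)).length := by
  induction l with
  | nil => simp at hx
  | cons a t ih =>
    rw [List.filter_cons, List.filter_cons]
    by_cases hax : a = x
    · subst hax
      rw [if_neg (by simp), if_pos (by simpa using hp)]
      have hle : (t.filter (fun u => decide ¬ u ∈ p ++ [a])).length
          ≤ (t.filter (fun u => decide ¬ u ∈ p)).length := by
        apply pv_filt_le
        intro y hy
        simp at hy ⊢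
        exact hy.1
      simp only [List.length_cons]
      omega
    · have hx' : x ∈ t := by
        cases hx with
        | head => exact absurd rfl hax
        | tail _ h => exact h
      by_cases hap : a ∈ p
      · rw [if_neg (by simp [hap]), if_neg (by simpa using hap)]
        exact ih hx'
      · rw [if_pos (by simp [hap, hax]), if_pos (by simpa using hap)]
        simp only [List.length_cons]
        exact Nat.succ_lt_succ (ih hx')

theorem pv_mu_concat_le (network : List (String × List (String × List String)))
    (p : List String) (x : String) : pv_mu network (p ++ [x]) ≤ pv_mu network p := by
  apply pv_filt_le
  intro y hy
  simp at hy ⊢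
  exact hy.1

theorem pv_lookA_mem {β : Type} {l : List (String × β)} {k : String} {v : β}
    (h : pvLookA l k = some v) : k ∈ l.map Prod.fst := by
  unfold pvLookA at h
  cases hf : l.find? (fun e => e.1 == k) with
  | none => simp [hf] at h
  | some a =>
    have hm := List.mem_of_find?_eq_some hf
    have hp := List.find?_some hf
    simp at hp
    exact hp ▸ List.mem_map.mpr ⟨a, hm, rfl⟩

theorem pv_mu_concat_lt {network : List (String × List (String × List String))}
    {p : List String} {x : String} (hx : x ∈ network.map Prod.fst) (hp : ¬ x ∈ p) :
    pv_mu network (p ++ [x]) < pv_mu network p :=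
  pv_filt_lt hx hp

theorem pv_mu_concat_eq {network : List (String × List (String × List String))}
    {p : List String} {x : String} (hx : x ∈ p) :
    pv_mu network (p ++ [x]) = pv_mu network p := by
  apply Nat.le_antisymm (pv_mu_concat_le network p x)
  apply pv_filt_le
  intro y hy
  simp at hy ⊢
  refine ⟨hy, ?_⟩
  intro he; subst he; exact absurd hx (by simpa using hy)

theorem pv_lookA_val_mem {β : Type} {l : List (String × β)} {k : String} {v : β}
    (h : pvLookA l k = some v) : v ∈ l.map Prod.snd := by
  unfold pvLookA at h
  cases hf : l.find? (fun e => e.1 == k) with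
  | none => simp [hf] at h
  | some a =>
    simp [hf] at h
    exact List.mem_map.mpr ⟨a, List.mem_of_find?_eq_some hf, h⟩

theorem pv_inner_sum {d : List (String × List String)} {conns : List String}
    (h : conns ∈ d.map Prod.snd) :
    conns.length ≤ d.foldr (fun kv a => kv.2.length + a) 0 := by
  induction d with
  | nil => simp at h
  | cons kv t ih =>
    simp only [List.map_cons, List.mem_cons] at h
    simp only [List.foldr]
    rcases h with h | h
    · subst h; omega
    · have := ih h; omega

theorem pv_conns_le_total {network : List (String × List (String × List String))} {u : String}
    {conns : List String} (h : pv_gc network u = some conns) :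
    conns.length ≤ pvTotB network := by
  unfold pv_gc at h
  cases hl : pvLookA network u with
  | none => simp [hl] at h
  | some d =>
    rw [hl] at h
    have hdm : d ∈ network.map Prod.snd := pv_lookA_val_mem hl
    have hcm : conns.length ≤ d.foldr (fun kv a => kv.2.length + a) 0 :=
      pv_inner_sum (pv_lookA_val_mem h)
    clear hl h
    induction network with
    | nil => simp at hdm
    | cons e t ih =>
      simp only [List.map_cons, List.mem_cons] at hdm
      simp only [pvTotB, List.foldr] at *
      rcases hdm with h | h
      · subst h; omega
      · have := ih h; omega

theorem pv_get_mem_keys {network : List (String × List (String × List String))} {u : String}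
    {conns : List String} (h : pv_gc network u = some conns) :
    u ∈ network.map Prod.fst := by
  unfold pv_gc at h
  cases hl : pvLookA network u with
  | none => simp [hl] at h
  | some d => exact pv_lookA_mem hl

-- the idealized (fuel-free, well-founded) form of A's recursion, used only by the proofs
mutual
def pv_spec_go (network : List (String × List (String × List String))) (end_ : String)
    (start : String) (path : List String) : Option (List String) :=
  if h : pv_gc network start = none ∨ pv_gc network end_ = none ∨ start = end_ then
    none
  else
    let conns := (pv_gc network start).getD []
    let p := path ++ [start]
    if end_ ∈ conns then some (p ++ [end_])
    else pv_spec_loop network end_ conns p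
termination_by (2 * pv_mu network path + (if start ∈ path then 1 else 0)) * (pvTotB network + 2)
decreasing_by
  rcases Option.ne_none_iff_exists'.mp (fun hn => h (Or.inl hn)) with ⟨conns, hc⟩
  have hlen : conns.length ≤ pvTotB network := pv_conns_le_total hc
  have hk : start ∈ network.map Prod.fst := pv_get_mem_keys hc
  have hle := pv_mu_concat_le network path start
  rw [hc]
  simp only [Option.getD_some]
  set T := pvTotB network
  by_cases hsp : start ∈ path
  · rw [pv_mu_concat_eq hsp, if_pos hsp]
    nlinarith
  · have hlt := pv_mu_concat_lt hk hsp
    rw [if_neg hsp]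
    have h2 : 2 * pv_mu network (path ++ [start]) * (T + 2) + 2 * (T + 2)
        ≤ 2 * pv_mu network path * (T + 2) := by nlinarith
    linarith

def pv_spec_loop (network : List (String × List (String × List String))) (end_ : String)
    (nodes : List String) (p : List String) : Option (List String) :=
  match nodes with
  | [] => none
  | node :: rest =>
    if node ∈ p then pv_spec_loop network end_ rest p
    else
      match pv_spec_go network end_ node p with
      | none => pv_spec_loop network end_ rest p
      | some np => if np = [] then pv_spec_loop network end_ rest p else some np
termination_by 2 * pv_mu network p * (pvTotB network + 2) + 1 + nodes.length
decreasing_by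
  all_goals simp only [List.length_cons]
  all_goals first
    | omega
    | (rename_i hnp; rw [if_neg hnp]; nlinarith)
end

-- fuel adequacy for port A: enough fuel makes pvGoA/pvLoopA compute the idealized recursion
theorem pvA_fuel (f : Nat) :
    (∀ network end_ start path,
      pv_mu network path + (if start ∈ path then 1 else 0) < f →
        pvGoA f network end_ start path = pv_spec_go network end_ start path) ∧
    (∀ network end_ nodes p, pv_mu network p < f →
        pvLoopA f network end_ nodes p = pv_spec_loop network end_ nodes p) := by
  induction f with
  | zero =>
    constructor
    · intro _ _ _ _ h; omega
    · intro _ _ _ _ h; omega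
  | succ f ih =>
    have h1 : ∀ network end_ start path,
        pv_mu network path + (if start ∈ path then 1 else 0) < f + 1 →
          pvGoA (f + 1) network end_ start path = pv_spec_go network end_ start path := by
      intro network end_ start path hf
      rw [pvGoA, pv_spec_go]
      by_cases hg : pv_gc network start = none ∨ pv_gc network end_ = none ∨ start = end_
      · rw [if_pos hg, dif_pos hg]
      · rw [if_neg hg, dif_neg hg]
        simp only
        by_cases hE : end_ ∈ (pv_gc network start).getD []
        · rw [if_pos hE, if_pos hE]
        · rw [if_neg hE, if_neg hE]
          rcases Option.ne_none_iff_exists'.mp (fun hn => hg (Or.inl hn)) with ⟨conns, hc⟩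
          have hk : start ∈ network.map Prod.fst := pv_get_mem_keys hc
          apply ih.2
          by_cases hsp : start ∈ path
          · rw [pv_mu_concat_eq hsp]
            rw [if_pos hsp] at hf
            omega
          · have := pv_mu_concat_lt hk hsp
            rw [if_neg hsp] at hf
            omega
    refine ⟨h1, ?_⟩
    intro network end_ nodes p hmu
    induction nodes with
    | nil => rw [pvLoopA, pv_spec_loop]
    | cons node rest ihn =>
      rw [pvLoopA, pv_spec_loop]
      by_cases hnp : node ∈ p
      · rw [if_pos hnp, if_pos hnp, ihn]
      · rw [if_neg hnp, if_neg hnp,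
          h1 network end_ node p (by rw [if_neg hnp]; omega)]
        cases pv_spec_go network end_ node p with
        | none => simp only [ihn]
        | some np =>
          by_cases hnil : np = []
          · simp only [if_pos hnil, ihn]
          · simp only [if_neg hnil]

-- stack-entry weight, exponential in twice the count of network members not yet on the
-- entry's path: one pop plus all its pushes strictly shrinks the total stack weight
def pv_e (network : List (String × List (String × List String))) (node : String) (p : List String) : Nat :=
  2 * pv_mu network p + (if (pv_gc network node).isSome then 1 else 0)

def pv_W (network : List (String × List (String × List String))) (stack : List (String × List String)) : Nat :=
  (stack.map (fun ep => (pvTotB network + 2) ^ pv_e network ep.1 ep.2)).sum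

theorem pv_W_skip_lt (network : List (String × List (String × List String)))
    (node : String) (p : List String) (rest : List (String × List String)) :
    pv_W network rest < pv_W network ((node, p) :: rest) := by
  simp only [pv_W, List.map_cons, List.sum_cons]
  have : 0 < (pvTotB network + 2) ^ pv_e network node p := Nat.pow_pos (by omega)
  omega

theorem pv_e_push_le {network : List (String × List (String × List String))}
    {p : List String} {nbr : String} (h : ¬ nbr ∈ p) :
    pv_e network nbr (p ++ [nbr]) ≤ 2 * pv_mu network p := by
  unfold pv_e
  cases hg : pv_gc network nbr with
  | none =>
    have := pv_mu_concat_le network p nbr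
    simp; omega
  | some c =>
    have hk : nbr ∈ network.map Prod.fst := pv_get_mem_keys hg
    have := pv_mu_concat_lt hk h
    simp; omega

theorem pv_W_push_lt {network : List (String × List (String × List String))}
    {node : String} {p : List String} {conns : List String}
    (hg : pv_gc network node = some conns)
    (rest : List (String × List String)) :
    pv_W network (((conns.reverse.filter (fun n => ¬ n ∈ p)).map (fun n => (n, p ++ [n]))).reverse ++ rest)
      < pv_W network ((node, p) :: rest) := by
  simp only [pv_W, List.map_append, List.sum_append, List.map_cons, List.sum_cons,
    List.map_reverse, List.sum_reverse]
  set β := pvTotB network + 2 with hβ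
  have hterm : ∀ x ∈ ((conns.reverse.filter (fun n => ¬ n ∈ p)).map (fun n => (n, p ++ [n]))).map
      (fun ep => β ^ pv_e network ep.1 ep.2), x ≤ β ^ (2 * pv_mu network p) := by
    intro x hx
    simp only [List.mem_map, List.mem_filter, List.mem_reverse] at hx
    rcases hx with ⟨ep, ⟨⟨n, ⟨hn, hnp⟩, rfl⟩, rfl⟩⟩
    apply Nat.pow_le_pow_right (by omega)
    exact pv_e_push_le (by simpa using hnp)
  have hsum := List.sum_le_card_nsmul _ _ hterm
  simp only [List.length_map, smul_eq_mul] at hsum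
  have hlen : (conns.reverse.filter (fun n => ¬ n ∈ p)).length ≤ pvTotB network := by
    calc (conns.reverse.filter (fun n => ¬ n ∈ p)).length ≤ conns.reverse.length :=
          List.length_filter_le _ _
      _ = conns.length := List.length_reverse
      _ ≤ pvTotB network := pv_conns_le_total hg
  have hE : pv_e network node p = 2 * pv_mu network p + 1 := by
    unfold pv_e; rw [hg]; simp
  rw [hE]
  have hpow : β ^ (2 * pv_mu network p + 1) = β ^ (2 * pv_mu network p) * β := pow_succ β _
  have hBpos : 0 < β ^ (2 * pv_mu network p) := Nat.pow_pos (by omega)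
  have hlt : (conns.reverse.filter (fun n => ¬ n ∈ p)).length * β ^ (2 * pv_mu network p)
      < β ^ (2 * pv_mu network p + 1) := by
    rw [hpow]
    calc (conns.reverse.filter (fun n => ¬ n ∈ p)).length * β ^ (2 * pv_mu network p)
        ≤ pvTotB network * β ^ (2 * pv_mu network p) :=
          Nat.mul_le_mul_right _ hlen
      _ < β * β ^ (2 * pv_mu network p) := by
          apply Nat.mul_lt_mul_of_lt_of_le (by omega) (le_refl _) hBpos
      _ = β ^ (2 * pv_mu network p) * β := Nat.mul_comm _ _
  have hsum' : (((conns.reverse.filter (fun n => ¬ n ∈ p)).map (fun n => (n, p ++ [n]))).map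
      (fun ep => β ^ pv_e network ep.1 ep.2)).sum
      ≤ (conns.reverse.filter (fun n => ¬ n ∈ p)).length * β ^ (2 * pv_mu network p) := hsum
  omega

-- A's pending recursive calls, read off a stack: first success wins
def pv_first (network : List (String × List (String × List String))) (end_ : String) :
    List (String × List String) → Option (List String)
  | [] => none
  | (n, p) :: rest => (pv_spec_go network end_ n p.dropLast).or (pv_first network end_ rest)

theorem pv_spec_loop_ne_nil {network : List (String × List (String × List String))} {end_ : String} :
    ∀ {nodes p r}, pv_spec_loop network end_ nodes p = some r → r ≠ [] := by
  intro nodes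
  induction nodes with
  | nil => intro p r h; simp [pv_spec_loop] at h
  | cons node rest ih =>
    intro p r h
    rw [pv_spec_loop] at h
    split at h
    · exact ih h
    · split at h
      · exact ih h
      · split at h
        · exact ih h
        · rename_i hne
          injection h with h3
          subst h3; exact hne

theorem pv_spec_go_ne_nil {network : List (String × List (String × List String))} {end_ : String}
    {n p r} (h : pv_spec_go network end_ n p = some r) : r ≠ [] := by
  rw [pv_spec_go] at h
  by_cases hc : pv_gc network n = none ∨ pv_gc network end_ = none ∨ n = end_
  · rw [dif_pos hc] at h; simp at h
  · rw [dif_neg hc] at h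
    simp only at h
    by_cases h2 : end_ ∈ (pv_gc network n).getD []
    · rw [if_pos h2] at h
      injection h with h3
      subst h3; simp
    · rw [if_neg h2] at h
      exact pv_spec_loop_ne_nil h

theorem pv_first_push (network : List (String × List (String × List String))) (end_ : String)
    (conns : List String) (p : List String) (rest : List (String × List String)) :
    pv_first network end_ ((conns.filter (fun n => ¬ n ∈ p)).map (fun n => (n, p ++ [n])) ++ rest)
      = (pv_spec_loop network end_ conns p).or (pv_first network end_ rest) := by
  induction conns with
  | nil => simp [pv_spec_loop]
  | cons c cs ih =>
    rw [pv_spec_loop]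
    by_cases h1 : c ∈ p
    · rw [if_pos h1, List.filter_cons, if_neg (by simpa using h1)]
      exact ih
    · rw [if_neg h1, List.filter_cons, if_pos (by simpa using h1)]
      rw [List.map_cons, List.cons_append, pv_first, List.dropLast_concat]
      cases hgo : pv_spec_go network end_ c p with
      | none => simp only [Option.none_or]; exact ih
      | some np =>
        simp only [if_neg (pv_spec_go_ne_nil hgo), Option.some_or]

theorem pv_pushed_eq {β : Type} (l : List String) (q : String → Bool) (f : String → β) :
    ((l.reverse.filter q).map f).reverse = (l.filter q).map f := by
  rw [List.filter_reverse, List.map_reverse, List.reverse_reverse]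

-- fuel adequacy and correctness for port B's loop: with fuel at least the stack weight,
-- the loop returns the first success among the stack's pending calls
theorem pvB_first (network : List (String × List (String × List String))) (end_ : String)
    (hend : pv_gc network end_ ≠ none) :
    ∀ (f : Nat) (stack : List (String × List String)), pv_W network stack ≤ f →
    (∀ e ∈ stack, e.1 ≠ end_ ∧ e.2.dropLast ++ [e.1] = e.2) →
    pvLoopB f network end_ stack = pv_first network end_ stack := by
  intro f
  induction f with
  | zero =>
    intro stack hW hinv
    match stack with
    | [] => rw [pvLoopB, pv_first]
    | (n, p) :: rest =>
      exfalso
      have := pv_W_skip_lt network n p rest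
      omega
  | succ f ih =>
    intro stack hW hinv
    match stack with
    | [] => rw [pvLoopB, pv_first]
    | (n, p) :: rest =>
      obtain ⟨hne, hdrop⟩ := hinv (n, p) (by simp)
      have hinvr : ∀ e ∈ rest, e.1 ≠ end_ ∧ e.2.dropLast ++ [e.1] = e.2 :=
        fun e he => hinv e (List.mem_cons_of_mem _ he)
      have hWr : pv_W network rest ≤ f := by
        have := pv_W_skip_lt network n p rest
        omega
      rw [pvLoopB, pv_first]
      simp only [pv_gc_eq]
      cases hg : pv_gc network n with
      | none =>
        rw [pv_spec_go, dif_pos (Or.inl hg), Option.none_or]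
        exact ih rest hWr hinvr
      | some conns =>
        have hngo : ¬ (pv_gc network n = none ∨ pv_gc network end_ = none ∨ n = end_) := by
          intro hc
          rcases hc with hc | hc | hc
          · rw [hg] at hc; cases hc
          · exact hend hc
          · exact hne hc
        rw [pv_spec_go, dif_neg hngo]
        simp only [hg, Option.getD_some, hdrop]
        by_cases hE : end_ ∈ conns
        · rw [if_pos hE, if_pos hE, Option.some_or]
        · rw [if_neg hE, if_neg hE]
          have hWp : pv_W network (((conns.reverse.filter (fun m => ¬ m ∈ p)).map (fun m => (m, p ++ [m]))).reverse ++ rest) ≤ f := by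
            have := pv_W_push_lt (p := p) hg rest
            omega
          rw [ih _ hWp ?_, pv_pushed_eq, pv_first_push]
          intro e he
          rw [List.mem_append] at he
          rcases he with he | he
          · rw [List.mem_reverse, List.mem_map] at he
            rcases he with ⟨m, hm, rfl⟩
            rw [List.mem_filter, List.mem_reverse] at hm
            refine ⟨fun hc => hE (hc ▸ hm.1), ?_⟩
            rw [List.dropLast_concat]
          · exact hinvr e he

theorem pv_mu_le_len (network : List (String × List (String × List String))) (p : List String) :
    pv_mu network p ≤ network.length := by
  calc pv_mu network p ≤ (network.map Prod.fst).length := List.length_filter_le _ _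
    _ = network.length := by simp

theorem pv_filt_lt_len {l : List String} {x : String} (hx : x ∈ l) (q : String → Bool)
    (hq : q x = false) : (l.filter q).length < l.length := by
  induction l with
  | nil => simp at hx
  | cons a t ih =>
    rw [List.filter_cons]
    rcases List.mem_cons.mp hx with rfl | hxt
    · rw [hq]
      exact Nat.lt_succ_of_le (List.length_filter_le _ _)
    · by_cases ha : q a = true
      · rw [if_pos ha]
        exact Nat.succ_lt_succ (ih hxt)
      · rw [if_neg ha]
        exact Nat.lt_succ_of_lt (ih hxt)

theorem pv_mu_lt_len {network : List (String × List (String × List String))} {p : List String}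
    {x : String} (hk : x ∈ network.map Prod.fst) (hx : x ∈ p) :
    pv_mu network p < network.length := by
  have : ((network.map Prod.fst).filter (fun u => ¬ u ∈ p)).length < (network.map Prod.fst).length :=
    pv_filt_lt_len hk _ (by simpa using hx)
  calc pv_mu network p < (network.map Prod.fst).length := this
    _ = network.length := by simp

theorem pv_AB_eq (network : List (String × List (String × List String))) (start : String)
    (end_ : String) (path : Option (List String)) :
    path_to_friend network start end_ path = path_to_friend_alt network start end_ path := by
  unfold path_to_friend path_to_friend_alt
  simp only [pv_gc_eq]
  by_cases hg : pv_gc network start = none ∨ pv_gc network end_ = none ∨ start = end_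
  · rw [if_pos hg, pvGoA, if_pos hg]
  · rw [if_neg hg]
    -- A side: fuel network.length + 1 suffices
    have hga : pvGoA (network.length + 1) network end_ start (path.getD [])
        = pv_spec_go network end_ start (path.getD []) := by
      apply (pvA_fuel (network.length + 1)).1
      rcases Option.ne_none_iff_exists'.mp (fun hn => hg (Or.inl hn)) with ⟨conns, hc⟩
      have hk : start ∈ network.map Prod.fst := pv_get_mem_keys hc
      by_cases hsp : start ∈ path.getD []
      · rw [if_pos hsp]
        have := pv_mu_lt_len hk hsp
        omega
      · rw [if_neg hsp]
        have := pv_mu_le_len network (path.getD [])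
        omega
    rw [hga]
    -- B side: fuel (pvTotB + 2) ^ (2 * network.length + 1) suffices
    have hWle : pv_W network [(start, path.getD [] ++ [start])]
        ≤ (pvTotB network + 2) ^ (2 * network.length + 1) := by
      simp only [pv_W, List.map_cons, List.map_nil, List.sum_cons, List.sum_nil, Nat.add_zero]
      apply Nat.pow_le_pow_right (by omega)
      unfold pv_e
      have h1 : pv_mu network (path.getD [] ++ [start]) ≤ network.length :=
        pv_mu_le_len network _
      split <;> omega
    rw [pvB_first network end_ (fun hn => hg (Or.inr (Or.inl hn))) _ _ hWle ?_]
    · rw [pv_first, pv_first, List.dropLast_concat, Option.or_none]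
    · intro e he
      simp only [List.mem_singleton] at he
      subst he
      exact ⟨fun hc => hg (Or.inr (Or.inr hc)), by rw [List.dropLast_concat]⟩

-- ===== VERDICT (by name: the statement is the Claim_ definition above) =====
theorem path_to_friend_spec : Claim_equal_path_to_friend := by
  intro network start end_ path _ _
  unfold Spec_path_to_friend
  exact pv_AB_eq network start end_ path
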